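-- pv_equiv track=rewrite | github.com/orbitronhd/cps | main.py | calculate_route
-- ===== SOURCE A (Python) =====
-- CITY_GRAPH = {
--     "Base_Station": {
--         "INT_01": {"road": "Road_1", "direction": "NS"}
--     },
--     "INT_01": {
--         "INT_02": {"road": "Road_2", "direction": "EW"},
--         "Hospital_Node": {"road": "Road_3", "direction": "NS"}
--     },
--     "INT_02": {
--         "Hospital_Node": {"road": "Road_4", "direction": "EW"}
--     },
--     "Hospital_Node": {} # End of the line
-- }
--
-- def calculate_route(start_node, target_node="Hospital_Node"):
--     queue = [[start_node]]
--     visited = set()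
--
--     while queue:
--         path = queue.pop(0)
--         current_node = path[-1]
--
--         if current_node == target_node:
--             # Convert Node path (Base -> INT_01 -> Hosp) to Road path (Road_1 -> Road_3)
--             road_sequence = []
--             for i in range(len(path)-1):
--                 road_name = CITY_GRAPH[path[i]][path[i+1]]["road"]
--                 road_sequence.append(road_name)
--             return path, road_sequence
--
--         if current_node not in visited:
--             neighbors = CITY_GRAPH.get(current_node, {}).keys()
--             for neighbor in neighbors:
--                 new_path = list(path)
--                 new_path.append(neighbor)
--                 queue.append(new_path)
--             visited.add(current_node)
--     return None, []
-- ===== SOURCE B (Python) =====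
-- CITY_GRAPH = {
--     "Base_Station": {
--         "INT_01": {"road": "Road_1", "direction": "NS"}
--     },
--     "INT_01": {
--         "INT_02": {"road": "Road_2", "direction": "EW"},
--         "Hospital_Node": {"road": "Road_3", "direction": "NS"}
--     },
--     "INT_02": {
--         "Hospital_Node": {"road": "Road_4", "direction": "EW"}
--     },
--     "Hospital_Node": {}
-- }
--
-- def calculate_route(start_node, target_node="Hospital_Node"):
--     # Parent-pointer BFS over node names; path reconstructed backwards at the end.
--     parent = {start_node: None}
--     order = [start_node]
--     i = 0
--     while i < len(order):
--         node = order[i]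
--         i += 1
--         if node == target_node:
--             path = []
--             cur = node
--             while cur is not None:
--                 path.append(cur)
--                 cur = parent[cur]
--             path.reverse()
--             roads = [CITY_GRAPH[path[j]][path[j + 1]]["road"]
--                      for j in range(len(path) - 1)]
--             return path, roads
--         for nb in CITY_GRAPH.get(node, {}):
--             if nb not in parent:
--                 parent[nb] = node
--                 order.append(nb)
--     return None, []
-- ===== Notes on version B (the rewrite author's own statement) =====
-- stated objective: alternative
-- what changed: Replaces A's BFS over a queue of whole node-paths (copying the path at every expansion, with a visited set) by a parent-pointer BFS that enqueues only node names and reconstructs the path backwards from the target.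
import Mathlib
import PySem

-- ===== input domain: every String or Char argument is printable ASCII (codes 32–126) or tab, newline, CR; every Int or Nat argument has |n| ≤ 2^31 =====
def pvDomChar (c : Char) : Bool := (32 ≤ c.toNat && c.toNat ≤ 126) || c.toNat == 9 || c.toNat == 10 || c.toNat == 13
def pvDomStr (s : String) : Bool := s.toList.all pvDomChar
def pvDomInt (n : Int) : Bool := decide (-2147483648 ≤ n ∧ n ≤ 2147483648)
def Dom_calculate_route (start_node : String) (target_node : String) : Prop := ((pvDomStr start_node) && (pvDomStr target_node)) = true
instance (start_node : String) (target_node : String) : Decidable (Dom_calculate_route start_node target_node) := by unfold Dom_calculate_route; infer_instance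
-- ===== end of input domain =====

-- B replaces A's queue-of-whole-paths BFS by a parent-pointer BFS over node names with
-- backward path reconstruction (objective: alternative decomposition, same asymptotic cost
-- on this fixed 4-node graph).

-- ===== PORT A =====

-- The fixed module-level CITY_GRAPH, as a nested insertion-ordered dict.
def cityGraph : PySem.Dict String (PySem.Dict String (PySem.Dict String String)) :=
  PySem.Dict.ofList
    [ ("Base_Station", PySem.Dict.ofList
        [ ("INT_01", PySem.Dict.ofList [("road", "Road_1"), ("direction", "NS")]) ]),
      ("INT_01", PySem.Dict.ofList
        [ ("INT_02", PySem.Dict.ofList [("road", "Road_2"), ("direction", "EW")]),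
          ("Hospital_Node", PySem.Dict.ofList [("road", "Road_3"), ("direction", "NS")]) ]),
      ("INT_02", PySem.Dict.ofList
        [ ("Hospital_Node", PySem.Dict.ofList [("road", "Road_4"), ("direction", "EW")]) ]),
      ("Hospital_Node", PySem.Dict.ofList []) ]

-- A's road-conversion loop: CITY_GRAPH[path[i]][path[i+1]]["road"] for consecutive pairs.
-- Python raises KeyError on a missing key; here getD is used — exact because A only calls
-- this on paths whose consecutive pairs are edges of CITY_GRAPH, where every lookup succeeds.
def aRoads : List String → List String
  | [] => []
  | [_] => []
  | a :: b :: rest =>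
      (((cityGraph.getD a PySem.Dict.empty).getD b PySem.Dict.empty).getD "road" "")
        :: aRoads (b :: rest)

-- A's while-loop over a queue of paths.  Fuel only makes the recursion total; on the fixed
-- 4-node graph the loop runs at most 5 iterations, so fuel 32 is never exhausted.
def aLoop (target : String) : Nat → List (List String) → PySem.Set String →
    Option (List String) × List String
  | 0, _, _ => (none, [])
  | _ + 1, [], _ => (none, [])
  | fuel + 1, path :: rest, visited =>
      let current := path.getLastD ""      -- path[-1]; queue paths are always non-empty
      if current = target then
        (some path, aRoads path)
      else if current ∈ visited then
        aLoop target fuel rest visited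
      else
        let neighbors := (cityGraph.getD current PySem.Dict.empty).keys
        aLoop target fuel (rest ++ neighbors.map (fun nb => path ++ [nb])) (visited.add current)

def calculate_route (start_node : String) (target_node : String) :
    Option (List String) × List String :=
  aLoop target_node 32 [[start_node]] (PySem.Set.ofList [])

-- ===== PORT B =====

-- B's backward walk along parent pointers (while cur is not None: append; cur = parent[cur]).
-- Fuel only makes it total; chains have length ≤ 4 here.
def bBuild (parent : PySem.Dict String (Option String)) :
    Nat → Option String → List String → List String
  | 0, _, path => path
  | _ + 1, none, path => path
  | fuel + 1, some cur, path => bBuild parent fuel ((parent.get? cur).getD none) (path ++ [cur])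

-- B's BFS over node names: the discovery list is consumed from the front while new nodes are
-- appended at the back (Python's index i walking the growing `order` list).
def bLoop (target : String) : Nat → List String → PySem.Dict String (Option String) →
    Option (List String) × List String
  | 0, _, _ => (none, [])
  | _ + 1, [], _ => (none, [])
  | fuel + 1, node :: rest, parent =>
      if node = target then
        let path := (bBuild parent 16 (some node) []).reverse
        (some path,
          (path.zip path.tail).map (fun p =>
            ((cityGraph.getD p.1 PySem.Dict.empty).getD p.2 PySem.Dict.empty).getD "road" ""))
      else
        let st := ((cityGraph.getD node PySem.Dict.empty).keys).foldl
          (fun (st : List String × PySem.Dict String (Option String)) nb =>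
            if st.2.contains nb then st else (st.1 ++ [nb], st.2.insert nb (some node)))
          (rest, parent)
        bLoop target fuel st.1 st.2

def calculate_route_alt (start_node : String) (target_node : String) :
    Option (List String) × List String :=
  bLoop target_node 16 [start_node] (PySem.Dict.ofList [(start_node, none)])

-- ===== PRECONDITION & SPEC =====
def Spec_calculate_route (start_node : String) (target_node : String) (out : Option (List String) × List String) : Prop := out = calculate_route_alt start_node target_node
instance (start_node : String) (target_node : String) (out : Option (List String) × List String) : Decidable (Spec_calculate_route start_node target_node out) := by unfold Spec_calculate_route; infer_instance

-- ===== CLAIM (what is proved, stated in full; the proofs are below) =====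
def Claim_equal_calculate_route : Prop := ∀ (start_node : String) (target_node : String), Dom_calculate_route start_node target_node → Spec_calculate_route start_node target_node (calculate_route start_node target_node)

-- ===== LEMMAS AND PROOFS =====

-- Both BFS searches only ever compare the four graph nodes (and the start node) with the
-- target, so the result is settled by a finite case analysis on which node (if any) the
-- start and the target are.
theorem route_eq (s t : String) : calculate_route s t = calculate_route_alt s t := by
  by_cases hst : s = t
  · subst hst
    by_cases h1 : s = "Base_Station"
    · subst h1; decide
    · by_cases h2 : s = "INT_01"
      · subst h2; decide
      · by_cases h3 : s = "INT_02"
        · subst h3; decide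
        · by_cases h4 : s = "Hospital_Node"
          · subst h4; decide
          · simp [calculate_route, calculate_route_alt, aLoop, bLoop, bBuild, aRoads,
              cityGraph, PySem.Dict.ofList, PySem.Dict.getD, PySem.Dict.get?,
              PySem.Dict.contains, PySem.Dict.insert, PySem.Dict.update, PySem.Dict.empty,
              List.find?]
  · by_cases h1 : s = "Base_Station"
    · subst h1
      by_cases t1 : t = "INT_01"
      · subst t1; decide
      · by_cases t2 : t = "INT_02"
        · subst t2; decide
        · by_cases t3 : t = "Hospital_Node"
          · subst t3; decide
          · have n1 : ¬ ("Base_Station" = t) := hst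
            have n2 : ¬ ("INT_01" = t) := fun h => t1 h.symm
            have n3 : ¬ ("INT_02" = t) := fun h => t2 h.symm
            have n4 : ¬ ("Hospital_Node" = t) := fun h => t3 h.symm
            simp [calculate_route, calculate_route_alt, aLoop, bLoop,
              cityGraph, PySem.Dict.ofList, PySem.Dict.getD, PySem.Dict.get?,
              PySem.Dict.contains, PySem.Dict.insert, PySem.Dict.update, PySem.Dict.empty,
              PySem.Dict.keys, PySem.Set.ofList, PySem.Set.add,
              List.find?, n1, n2, n3, n4]
    · by_cases h2 : s = "INT_01"
      · subst h2
        by_cases t1 : t = "INT_02"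
        · subst t1; decide
        · by_cases t2 : t = "Hospital_Node"
          · subst t2; decide
          · by_cases t3 : t = "Base_Station"
            · subst t3; decide
            · have n1 : ¬ ("INT_01" = t) := hst
              have n2 : ¬ ("INT_02" = t) := fun h => t1 h.symm
              have n3 : ¬ ("Hospital_Node" = t) := fun h => t2 h.symm
              simp [calculate_route, calculate_route_alt, aLoop, bLoop,
                cityGraph, PySem.Dict.ofList, PySem.Dict.getD, PySem.Dict.get?,
                PySem.Dict.contains, PySem.Dict.insert, PySem.Dict.update, PySem.Dict.empty,
                PySem.Dict.keys, PySem.Set.ofList, PySem.Set.add,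
                List.find?, n1, n2, n3]
      · by_cases h3 : s = "INT_02"
        · subst h3
          by_cases t1 : t = "Hospital_Node"
          · subst t1; decide
          · by_cases t2 : t = "Base_Station"
            · subst t2; decide
            · by_cases t3 : t = "INT_01"
              · subst t3; decide
              · have n1 : ¬ ("INT_02" = t) := hst
                have n2 : ¬ ("Hospital_Node" = t) := fun h => t1 h.symm
                simp [calculate_route, calculate_route_alt, aLoop, bLoop,
                  cityGraph, PySem.Dict.ofList, PySem.Dict.getD, PySem.Dict.get?,
                  PySem.Dict.contains, PySem.Dict.insert, PySem.Dict.update, PySem.Dict.empty,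
                  PySem.Dict.keys, PySem.Set.ofList, PySem.Set.add,
                  List.find?, n1, n2]
        · by_cases h4 : s = "Hospital_Node"
          · subst h4
            have n1 : ¬ ("Hospital_Node" = t) := hst
            simp [calculate_route, calculate_route_alt, aLoop, bLoop,
              cityGraph, PySem.Dict.ofList, PySem.Dict.getD, PySem.Dict.get?,
              PySem.Dict.contains, PySem.Dict.insert, PySem.Dict.update, PySem.Dict.empty,
              PySem.Dict.keys, PySem.Set.ofList, PySem.Set.add,
              List.find?, n1]
          · -- start is not a graph node and differs from the target: one iteration, no neighbors
            have b1 : (("Base_Station" : String) == s) = false :=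
              beq_eq_false_iff_ne.mpr (fun h => h1 h.symm)
            have b2 : (("INT_01" : String) == s) = false :=
              beq_eq_false_iff_ne.mpr (fun h => h2 h.symm)
            have b3 : (("INT_02" : String) == s) = false :=
              beq_eq_false_iff_ne.mpr (fun h => h3 h.symm)
            have b4 : (("Hospital_Node" : String) == s) = false :=
              beq_eq_false_iff_ne.mpr (fun h => h4 h.symm)
            simp [calculate_route, calculate_route_alt, aLoop, bLoop,
              cityGraph, PySem.Dict.ofList, PySem.Dict.getD, PySem.Dict.get?,
              PySem.Dict.contains, PySem.Dict.insert, PySem.Dict.update, PySem.Dict.empty,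
              PySem.Dict.keys, PySem.Set.ofList, PySem.Set.add,
              List.find?, hst, b1, b2, b3, b4]

-- ===== VERDICT (by name: the statement is the Claim_ definition above) =====
theorem calculate_route_spec : Claim_equal_calculate_route := by
  intro s t _
  unfold Spec_calculate_route
  exact route_eq s t
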